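-- pv_equiv track=rewrite | github.com/tiago2904santos/Central-de-Viagens-2.0 | eventos/forms.py | _parse_hidden_ids
-- ===== SOURCE A (Python) =====
-- def _parse_hidden_ids(raw_value):
--     ids = []
--     seen = set()
--     for item in str(raw_value or '').split(','):
--         value = item.strip()
--         if not value.isdigit() or value in seen:
--             continue
--         seen.add(value)
--         ids.append(int(value))
--     return ids
-- ===== SOURCE B (Python) =====
-- def _parse_hidden_ids(raw_value):
--     def rec(tokens):
--         if not tokens:
--             return []
--         head, rest = tokens[0].strip(), tokens[1:]
--         if not head.isdigit():
--             return rec(rest)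
--         return [int(head)] + rec([t for t in rest if t.strip() != head])
--     return rec(str(raw_value or '').split(','))
-- ===== Notes on version B (the rewrite author's own statement) =====
-- stated objective: alternative
-- what changed: Instead of one forward loop that remembers past tokens in a seen-set, B recurses on the token list and, whenever it keeps a digit head, deletes all FUTURE occurrences of that token from the remainder before recursing, so no auxiliary seen structure exists at all.
import Mathlib
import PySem

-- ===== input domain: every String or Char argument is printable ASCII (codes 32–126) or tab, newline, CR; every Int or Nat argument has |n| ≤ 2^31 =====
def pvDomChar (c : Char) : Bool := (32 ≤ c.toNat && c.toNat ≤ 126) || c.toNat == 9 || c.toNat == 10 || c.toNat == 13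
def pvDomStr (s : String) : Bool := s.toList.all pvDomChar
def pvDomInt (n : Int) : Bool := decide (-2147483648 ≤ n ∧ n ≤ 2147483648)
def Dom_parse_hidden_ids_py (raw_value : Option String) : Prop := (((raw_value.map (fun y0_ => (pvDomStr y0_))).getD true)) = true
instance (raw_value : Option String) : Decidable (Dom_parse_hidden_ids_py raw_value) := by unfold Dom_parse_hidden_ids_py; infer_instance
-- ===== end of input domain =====

-- B replaces A's forward loop with a seen-set by a recursion that, when it keeps a digit
-- token, deletes all FUTURE occurrences of it before recursing — alternative, no seen state.

-- ===== PORT A =====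
-- str(raw_value or '') : None and "" both yield "", so this is raw_value.getD "".
-- s.split(',') : Str.split? is some for a nonempty separator, so .getD [] is exact.
-- int(value) only runs when value.isdigit() holds, so ofStr? is some there; .getD 0 is unreachable.
-- the loop body of A, named so the proof can unfold it step by step
def pvStepA (st : List Int × PySem.Set String) (item : String) : List Int × PySem.Set String :=
  let value := PySem.Str.strip item
  if !(PySem.Str.strIsdigit value) || st.2.contains value then st
  else (st.1 ++ [(PySem.Int.ofStr? value).getD 0], st.2.add value)

def parse_hidden_ids_py (raw_value : Option String) : List Int :=
  (((PySem.Str.split? (raw_value.getD "") ",").getD []).foldl pvStepA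
    ([], PySem.Set.empty)).1

-- ===== PORT B =====
-- recursive helper 'rec' of Source B: keep a digit head, drop its future duplicates, recurse
def pvAltRec : List String → List Int
  | [] => []
  | t :: rest =>
    let head := PySem.Str.strip t
    if !(PySem.Str.strIsdigit head) then pvAltRec rest
    else ((PySem.Int.ofStr? head).getD 0) ::
      pvAltRec (rest.filter (fun u => PySem.Str.strip u != head))
termination_by ts => ts.length
decreasing_by
  · simp
  · simpa using Nat.lt_succ_of_le
      (List.length_filter_le (fun x => PySem.Str.strip x != PySem.Str.strip t) rest)

def parse_hidden_ids_py_alt (raw_value : Option String) : List Int :=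
  pvAltRec ((PySem.Str.split? (raw_value.getD "") ",").getD [])

-- ===== PRECONDITION & SPEC =====
def Spec_parse_hidden_ids_py (raw_value : Option String) (out : List Int) : Prop := out = parse_hidden_ids_py_alt raw_value
instance (raw_value : Option String) (out : List Int) : Decidable (Spec_parse_hidden_ids_py raw_value out) := by unfold Spec_parse_hidden_ids_py; infer_instance

-- ===== CLAIM =====
def Claim_equal_parse_hidden_ids_py : Prop := ∀ (raw_value : Option String), Dom_parse_hidden_ids_py raw_value → Spec_parse_hidden_ids_py raw_value (parse_hidden_ids_py raw_value)

-- ===== LEMMAS AND PROOFS =====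

-- invariant: A's fold with seen-set 'seen' equals B's recursion restricted to the
-- tokens whose stripped value is not yet in 'seen'
lemma loop_eq (ts : List String) (ids : List Int) (seen : PySem.Set String) :
    (ts.foldl pvStepA (ids, seen)).1
    = ids ++ pvAltRec (ts.filter (fun u => !seen.contains (PySem.Str.strip u))) := by
  induction ts generalizing ids seen with
  | nil => simp [pvAltRec]
  | cons t ts ih =>
    rw [List.foldl_cons, List.filter_cons]
    by_cases hc : PySem.Str.strip t ∈ seen
    · -- already seen: A skips it, B's filter drops it
      have h1 : pvStepA (ids, seen) t = (ids, seen) := by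
        simp [pvStepA, PySem.Set.contains, hc]
      rw [h1, ih, if_neg (by simp [PySem.Set.contains, hc])]
    · by_cases hd : PySem.Chars.strIsdigit (PySem.Chars.strip t.toList) = true
      · -- fresh digit token: both emit it; future duplicates are dropped either way
        have hc' : String.ofList (PySem.Chars.strip t.toList) ∉ seen := hc
        have h1 : pvStepA (ids, seen) t
            = (ids ++ [(PySem.Int.ofStr? (PySem.Str.strip t)).getD 0],
               seen.add (PySem.Str.strip t)) := by
          simp [pvStepA, PySem.Set.contains, PySem.Str.strIsdigit, PySem.Str.strip, hd, hc']
        rw [h1, ih, if_pos (by simp [PySem.Set.contains, hc])]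
        rw [show pvAltRec (t :: List.filter (fun u => !seen.contains (PySem.Str.strip u)) ts)
            = ((PySem.Int.ofStr? (PySem.Str.strip t)).getD 0) ::
              pvAltRec ((List.filter (fun u => !seen.contains (PySem.Str.strip u)) ts).filter
                (fun u => PySem.Str.strip u != PySem.Str.strip t)) from by
          simp only [pvAltRec]
          simp [PySem.Str.strIsdigit, PySem.Str.strip, hd]]
        rw [List.filter_filter, List.append_assoc, List.singleton_append]
        congr 3
        apply List.filter_congr
        intro u _
        by_cases h : PySem.Str.strip u = PySem.Str.strip t
        · simp [h, PySem.Set.contains, PySem.Set.add, hc]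
        · simp [h, PySem.Set.contains, PySem.Set.add, hc]
      · -- fresh non-digit token: A skips it, B's recursion discards it without filtering
        have h1 : pvStepA (ids, seen) t = (ids, seen) := by
          simp [pvStepA, PySem.Str.strIsdigit, PySem.Str.strip, hd]
        rw [h1, ih, if_pos (by simp [PySem.Set.contains, hc])]
        rw [show pvAltRec (t :: List.filter (fun u => !seen.contains (PySem.Str.strip u)) ts)
            = pvAltRec (List.filter (fun u => !seen.contains (PySem.Str.strip u)) ts) from by
          simp only [pvAltRec]
          simp [PySem.Str.strIsdigit, PySem.Str.strip, hd]]

-- ===== VERDICT =====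
theorem parse_hidden_ids_py_spec : Claim_equal_parse_hidden_ids_py := by
  intro raw_value _
  unfold Spec_parse_hidden_ids_py parse_hidden_ids_py parse_hidden_ids_py_alt
  rw [loop_eq]
  simp [PySem.Set.contains, PySem.Set.empty]
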